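-- pv_equiv track=rewrite | github.com/sense-fw/python-study_practice | practice_8/pract8_10.py | max_in_sorted_rows
-- ===== SOURCE A (Python) =====
-- def is_sorted(row):
--     return all(row[i] <= row[i+1] for i in range(len(row)-1)) or \
--            all(row[i] >= row[i+1] for i in range(len(row)-1))
--
-- def max_in_sorted_rows(matrix):
--     max_elem = None
--     for row in matrix:
--         if is_sorted(row):
--             row_max = max(row)
--             if max_elem is None or row_max > max_elem:
--                 max_elem = row_max
--     return max_elem
-- ===== SOURCE B (Python) =====
-- def max_in_sorted_rows(matrix):
--     candidates = [max(row) for row in matrix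
--                   if row == sorted(row) or row == sorted(row, reverse=True)]
--     return max(candidates) if candidates else None
-- ===== Notes on version B (the rewrite author's own statement) =====
-- stated objective: idiomatic
-- what changed: Replaces the explicit accumulator loop with the index-based pairwise sortedness scan by a comprehension that tests each row against its sorted copies (ascending or descending) and a single max over the collected row maxima.
import Mathlib
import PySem

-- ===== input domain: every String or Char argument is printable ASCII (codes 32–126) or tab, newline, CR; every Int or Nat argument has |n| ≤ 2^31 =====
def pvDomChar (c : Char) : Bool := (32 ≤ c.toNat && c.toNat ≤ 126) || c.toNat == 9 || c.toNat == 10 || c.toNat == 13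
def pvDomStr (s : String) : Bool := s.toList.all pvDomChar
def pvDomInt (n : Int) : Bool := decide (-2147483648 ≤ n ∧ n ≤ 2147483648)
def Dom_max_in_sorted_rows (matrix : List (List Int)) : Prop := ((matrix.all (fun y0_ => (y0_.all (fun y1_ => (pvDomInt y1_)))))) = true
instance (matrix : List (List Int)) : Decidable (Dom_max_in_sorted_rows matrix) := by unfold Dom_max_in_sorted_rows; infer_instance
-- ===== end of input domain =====

-- B replaces the accumulator loop with the index-based pairwise scan by a comprehension
-- comparing each row with its sorted copies, then one max over the collected row maxima.

-- ===== PORT A =====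
-- all(row[i] <= row[i+1] for i in range(len(row)-1)) or all(row[i] >= row[i+1] ...)
-- (indices i and i+1 are always in range for i in range(len(row)-1), so pyGetD is exact here)
def is_sorted (row : List Int) : Bool :=
  ((PySem.List.pyRange 0 ((row.length : Int) - 1) 1).all
      (fun i => decide (PySem.List.pyGetD row i 0 ≤ PySem.List.pyGetD row (i + 1) 0))) ||
  ((PySem.List.pyRange 0 ((row.length : Int) - 1) 1).all
      (fun i => decide (PySem.List.pyGetD row i 0 ≥ PySem.List.pyGetD row (i + 1) 0)))

def max_in_sorted_rows (matrix : List (List Int)) : Option Int :=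
  matrix.foldl
    (fun max_elem row =>
      if is_sorted row then
        match PySem.List.max? row (fun y => y) with
        | none => max_elem        -- Python raises ValueError here (empty row); outside Pre_
        | some row_max =>
          match max_elem with
          | none => some row_max
          | some m => if row_max > m then some row_max else max_elem
      else max_elem)
    none

-- ===== PORT B =====
-- row == sorted(row) or row == sorted(row, reverse=True)
def qualifiesB (row : List Int) : Bool :=
  decide (row = PySem.List.sorted row (fun y => y) false) ||
  decide (row = PySem.List.sorted row (fun y => y) true)

-- candidates = [max(row) for row in matrix if ...]; return max(candidates) if candidates else None
-- (max(row) on an empty qualifying row raises in Python; max? returns none there — outside Pre_)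
def max_in_sorted_rows_alt (matrix : List (List Int)) : Option Int :=
  let candidates := (matrix.filter qualifiesB).filterMap (fun row => PySem.List.max? row (fun y => y))
  PySem.List.max? candidates (fun y => y)

-- ===== PRECONDITION & SPEC =====
-- A (and B) raise ValueError from max() on any empty row (every empty row counts as sorted):
-- Pre_ excludes matrices containing an empty row.
def Pre_max_in_sorted_rows (matrix : List (List Int)) : Prop := ∀ row ∈ matrix, row ≠ []
instance (matrix : List (List Int)) : Decidable (Pre_max_in_sorted_rows matrix) := by
  unfold Pre_max_in_sorted_rows; infer_instance

def pvWitness_max_in_sorted_rows : List (List Int) := [[1, 2, 3], [3, 1, 2], [5, 4, 4]]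

def Spec_max_in_sorted_rows (matrix : List (List Int)) (out : Option Int) : Prop := out = max_in_sorted_rows_alt matrix
instance (matrix : List (List Int)) (out : Option Int) : Decidable (Spec_max_in_sorted_rows matrix out) := by unfold Spec_max_in_sorted_rows; infer_instance

-- ===== CLAIM (what is proved, stated in full; the proofs are below) =====
def Claim_equal_max_in_sorted_rows : Prop := ∀ (matrix : List (List Int)), Dom_max_in_sorted_rows matrix → Pre_max_in_sorted_rows matrix → Spec_max_in_sorted_rows matrix (max_in_sorted_rows matrix)

-- ===== LEMMAS AND PROOFS =====

-- the optional running max both programs compute, over the list of qualifying-row maxima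
def ofoldMax (acc : Option Int) (vs : List Int) : Option Int :=
  vs.foldl (fun a v => some (match a with | none => v | some x => max x v)) acc

lemma ofoldMax_some (vs : List Int) (a : Int) :
    ofoldMax (some a) vs = some (vs.foldl max a) := by
  induction vs generalizing a with
  | nil => rfl
  | cons v t ih => simp [ofoldMax, List.foldl] at *; exact ih (max a v)

lemma max?_eq_ofoldMax (vs : List Int) :
    PySem.List.max? vs (fun y => y) = ofoldMax none vs := by
  cases vs with
  | nil => rfl
  | cons v t =>
    rw [PySem.List.max?_id_cons]
    simp only [ofoldMax, List.foldl]
    exact (ofoldMax_some t v).symm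

lemma asc_scan_iff (row : List Int) :
    ((PySem.List.pyRange 0 ((row.length : Int) - 1) 1).all
        (fun i => decide (PySem.List.pyGetD row i 0 ≤ PySem.List.pyGetD row (i + 1) 0))) = true
      ↔ List.IsChain (· ≤ ·) row := by
  cases row with
  | nil => simp [PySem.List.pyRange_one_eq_nil]
  | cons x t =>
    have hlen : ((x :: t).length : Int) - 1 = (t.length : Nat) := by
      simp
    rw [hlen, PySem.List.pyRange_zero_natCast]
    simp only [List.all_map, List.all_eq_true, List.mem_range, Function.comp]
    rw [List.isChain_iff_getElem]
    constructor
    · intro h i hi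
      have := h i (by simpa using hi)
      rw [PySem.List.pyGetD_natCast, show ((i : Int) + 1) = ((i + 1 : Nat) : Int) by push_cast; ring,
        PySem.List.pyGetD_natCast] at this
      rw [List.getD_eq_getElem _ _ (show i < (x :: t).length by simp; omega),
        List.getD_eq_getElem _ _ (show i + 1 < (x :: t).length by simpa using hi)] at this
      exact of_decide_eq_true this
    · intro h i hi
      have hi' : i + 1 < (x :: t).length := by simpa using hi
      have := h i (by simpa using hi)
      rw [PySem.List.pyGetD_natCast, show ((i : Int) + 1) = ((i + 1 : Nat) : Int) by push_cast; ring,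
        PySem.List.pyGetD_natCast]
      rw [List.getD_eq_getElem _ _ (show i < (x :: t).length by simp; omega),
        List.getD_eq_getElem _ _ hi']
      exact decide_eq_true this

lemma desc_scan_iff (row : List Int) :
    ((PySem.List.pyRange 0 ((row.length : Int) - 1) 1).all
        (fun i => decide (PySem.List.pyGetD row i 0 ≥ PySem.List.pyGetD row (i + 1) 0))) = true
      ↔ List.IsChain (· ≥ ·) row := by
  cases row with
  | nil => simp [PySem.List.pyRange_one_eq_nil]
  | cons x t =>
    have hlen : ((x :: t).length : Int) - 1 = (t.length : Nat) := by
      simp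
    rw [hlen, PySem.List.pyRange_zero_natCast]
    simp only [List.all_map, List.all_eq_true, List.mem_range, Function.comp]
    rw [List.isChain_iff_getElem]
    constructor
    · intro h i hi
      have := h i (by simpa using hi)
      rw [PySem.List.pyGetD_natCast, show ((i : Int) + 1) = ((i + 1 : Nat) : Int) by push_cast; ring,
        PySem.List.pyGetD_natCast] at this
      rw [List.getD_eq_getElem _ _ (show i < (x :: t).length by simp; omega),
        List.getD_eq_getElem _ _ (show i + 1 < (x :: t).length by simpa using hi)] at this
      exact of_decide_eq_true this
    · intro h i hi
      have hi' : i + 1 < (x :: t).length := by simpa using hi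
      have := h i (by simpa using hi)
      rw [PySem.List.pyGetD_natCast, show ((i : Int) + 1) = ((i + 1 : Nat) : Int) by push_cast; ring,
        PySem.List.pyGetD_natCast]
      rw [List.getD_eq_getElem _ _ (show i < (x :: t).length by simp; omega),
        List.getD_eq_getElem _ _ hi']
      exact decide_eq_true this

-- the two sortedness tests agree on every row
lemma is_sorted_eq_qualifiesB (row : List Int) : is_sorted row = qualifiesB row := by
  unfold is_sorted qualifiesB
  have hasc : ((PySem.List.pyRange 0 ((row.length : Int) - 1) 1).all
      (fun i => decide (PySem.List.pyGetD row i 0 ≤ PySem.List.pyGetD row (i + 1) 0))) = true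
      ↔ row = PySem.List.sorted row (fun y => y) false := by
    rw [asc_scan_iff, List.isChain_iff_pairwise]
    constructor
    · intro h; exact (PySem.List.sorted_eq_self_of_pairwise row (fun y => y) h).symm
    · intro h; rw [h]
      exact PySem.List.sorted_pairwise row (fun y => y)
  have hdesc : ((PySem.List.pyRange 0 ((row.length : Int) - 1) 1).all
      (fun i => decide (PySem.List.pyGetD row i 0 ≥ PySem.List.pyGetD row (i + 1) 0))) = true
      ↔ row = PySem.List.sorted row (fun y => y) true := by
    rw [desc_scan_iff, List.isChain_iff_pairwise]
    constructor
    · intro h; exact (PySem.List.sorted_rev_eq_self_of_pairwise row (fun y => y) h).symm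
    · intro h; rw [h]
      exact PySem.List.sorted_pairwise_rev row (fun y => y)
  rw [Bool.eq_iff_iff]
  simp only [Bool.or_eq_true, decide_eq_true_eq, hasc, hdesc]

lemma ofoldMax_cons (acc : Option Int) (v : Int) (vs : List Int) :
    ofoldMax acc (v :: vs)
      = ofoldMax (some (match acc with | none => v | some x => max x v)) vs := rfl

-- A's loop, started from any accumulator, computes the running max of the qualifying rows' maxima
lemma loopA_eq_ofoldMax (matrix : List (List Int)) (acc : Option Int)
    (hpre : ∀ row ∈ matrix, row ≠ []) :
    matrix.foldl
      (fun max_elem row =>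
        if is_sorted row then
          match PySem.List.max? row (fun y => y) with
          | none => max_elem
          | some row_max =>
            match max_elem with
            | none => some row_max
            | some m => if row_max > m then some row_max else max_elem
        else max_elem)
      acc
    = ofoldMax acc
        ((matrix.filter qualifiesB).filterMap (fun row => PySem.List.max? row (fun y => y))) := by
  induction matrix generalizing acc with
  | nil => rfl
  | cons row rest ih =>
    have hne : row ≠ [] := hpre row (List.mem_cons_self ..)
    have ihr := ih (hpre := fun r hr => hpre r (List.mem_cons_of_mem _ hr))
    simp only [List.foldl_cons, List.filter_cons]
    rw [is_sorted_eq_qualifiesB]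
    rcases Bool.eq_false_or_eq_true (qualifiesB row) with hq | hq
    · obtain ⟨x, t, rfl⟩ := List.exists_cons_of_ne_nil hne
      simp only [hq, if_true, List.filterMap_cons, PySem.List.max?_id_cons]
      rw [ihr, ofoldMax_cons]
      congr 1
      cases acc with
      | none => rfl
      | some m =>
        rcases lt_or_ge m (t.foldl max x) with h | h
        · simp [h, max_eq_right h.le]
        · simp [not_lt.mpr h, max_eq_left h]
    · rw [hq]
      simp only [Bool.false_eq_true, if_false]
      exact ihr acc

-- ===== VERDICT (by name: the statement is the Claim_ definition above) =====
theorem max_in_sorted_rows_spec : Claim_equal_max_in_sorted_rows := by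
  intro matrix _ hpre
  unfold Spec_max_in_sorted_rows max_in_sorted_rows max_in_sorted_rows_alt
  rw [loopA_eq_ofoldMax matrix none hpre, max?_eq_ofoldMax]
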